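-- pv_equiv track=rewrite | github.com/ccaroon/advent-of-code | 2024/day02/utils.py | report_is_safe
-- ===== SOURCE A (Python) =====
-- def comp_direction(level1:int, level2:int) -> int:
--     """
--     Compute if direction between level1 & level2 is...
--
--     Returns:
--         int: -1 | 0 | +1 (dec, same, inc)
--
--     >>> comp_direction(12, 13)
--     1
--
--     >>> comp_direction(42, 42)
--     0
--
--     >>> comp_direction(77, 42)
--     -1
--     """
--     direction = 0
--
--     if level1 < level2:
--         direction = +1
--     elif level1 == level2:
--         direction = 0
--     elif level1 > level2:
--         direction = -1
--
--     return direction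
--
-- def report_is_safe(report:list[int]) -> tuple[bool, int]:
--     """
--     The Report is Safe if...
--
--     - The levels are either all increasing or all decreasing.
--     - Any two adjacent levels differ by at least one and at most three.
--
--     Returns:
--         tuple: (is_safe, failure_list)
--
--     >>> report_is_safe([7,6,4,2,1])
--     (True, [])
--
--     >>> report_is_safe([1,2,7,8,9])
--     (False, [1])
--
--     >>> report_is_safe([9,7,6,2,1])
--     (False, [2])
--
--     >>> report_is_safe([1,3,2,4,5])
--     (False, [1])
--
--     >>> report_is_safe([8,6,4,4,1])
--     (False, [2])
--
--     >>> report_is_safe([1,3,6,7,9])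
--     (True, [])
--     """
--     # Assume it's safe
--     is_safe = True
--     failed_levels = []
--
--     main_direction = None
--
--     for idx in range(len(report) - 1):
--         diff = abs(report[idx] - report[idx + 1])
--         rep_dir = comp_direction(report[idx], report[idx + 1])
--
--         # use first non-zero direction as main_direction of levels
--         if rep_dir != 0 and main_direction is None:
--             main_direction = rep_dir
--
--         if (diff < 1 or diff > 3) or (rep_dir != main_direction):
--             is_safe = False
--             failed_levels.append(idx)
--             # break
--
--     return (is_safe, failed_levels)
-- ===== SOURCE B (Python) =====
-- def report_is_safe(report: list[int]) -> tuple[bool, list]: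
--     pairs = list(zip(report, report[1:]))
--     # locate the pivot: the first adjacent pair with unequal levels
--     j = next((i for i, (a, b) in enumerate(pairs) if a != b), None)
--     if j is None:
--         # constant report: every adjacent difference is 0, so every index fails
--         idxs = list(range(len(pairs)))
--         return (not idxs, idxs)
--     d = 1 if pairs[j][1] > pairs[j][0] else -1
--     # one multiplicative range test replaces abs/sign/direction comparisons
--     fails = [i for i, (a, b) in enumerate(pairs) if not 1 <= (b - a) * d <= 3]
--     return (not fails, fails)
-- ===== Notes on version B (the rewrite author's own statement) =====
-- stated objective: alternative
-- what changed: Instead of A's single stateful loop carrying is_safe, the failure list and a lazily-set optional main direction with abs/sign comparisons per pair, B first searches for the pivot (the first unequal adjacent pair) to fix a direction d in {+1,-1}, then classifies every pair with one multiplicative range test 1 <= (b-a)*d <= 3, treating the all-levels-equal report (no pivot) as its own case where every index fails.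
import Mathlib
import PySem

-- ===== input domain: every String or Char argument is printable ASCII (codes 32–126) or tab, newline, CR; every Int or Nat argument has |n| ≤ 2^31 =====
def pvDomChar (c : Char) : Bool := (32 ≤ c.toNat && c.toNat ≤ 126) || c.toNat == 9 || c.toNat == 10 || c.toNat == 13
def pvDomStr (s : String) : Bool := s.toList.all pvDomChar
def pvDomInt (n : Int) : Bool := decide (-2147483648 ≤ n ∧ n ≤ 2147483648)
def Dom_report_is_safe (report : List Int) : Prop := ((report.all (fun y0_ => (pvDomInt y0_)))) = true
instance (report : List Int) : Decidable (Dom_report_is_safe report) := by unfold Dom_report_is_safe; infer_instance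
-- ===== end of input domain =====

-- B replaces A's stateful loop (optional direction + abs/sign tests per pair) by: find the pivot pair fixing a direction d, then one multiplicative range test 1 ≤ (b-a)*d ≤ 3 per pair, with the all-equal report as its own case; objective: alternative decomposition, same cost.


-- ===== PORT A =====
def comp_direction (level1 level2 : Int) : Int :=
  if level1 < level2 then 1
  else if level1 = level2 then 0
  else if level1 > level2 then -1
  else 0

-- loop 'for idx in range(len(report) - 1)': idx and idx+1 are always in range, so pyGetD is exact here
def report_is_safe (report : List Int) : Bool × List Int :=
  let st := (PySem.List.pyRange 0 ((report.length : Int) - 1) 1).foldl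
    (fun (st : Bool × List Int × Option Int) (idx : Int) =>
      let diff := |PySem.List.pyGetD report idx 0 - PySem.List.pyGetD report (idx + 1) 0|
      let rep_dir := comp_direction (PySem.List.pyGetD report idx 0) (PySem.List.pyGetD report (idx + 1) 0)
      let main := if rep_dir ≠ 0 ∧ st.2.2 = none then some rep_dir else st.2.2
      if diff < 1 ∨ diff > 3 ∨ some rep_dir ≠ main
      then (false, st.2.1 ++ [idx], main)
      else (st.1, st.2.1, main))
    (true, [], none)
  (st.1, st.2.1)

-- ===== PORT B =====
def report_is_safe_alt (report : List Int) : Bool × List Int :=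
  let pairs := report.zip (report.drop 1)
  match (PySem.List.enumerate pairs 0).find? (fun p => p.2.1 != p.2.2) with
  | none =>
      -- constant report: every adjacent difference is 0, so every index fails
      let idxs := PySem.List.pyRange 0 (pairs.length : Int) 1
      (idxs.isEmpty, idxs)
  | some jp =>
      let d : Int := if jp.2.2 > jp.2.1 then 1 else -1
      let fails := ((PySem.List.enumerate pairs 0).filter
          (fun p => !(decide (1 ≤ (p.2.2 - p.2.1) * d ∧ (p.2.2 - p.2.1) * d ≤ 3)))).map (·.1)
      (fails.isEmpty, fails)

-- ===== PRECONDITION & SPEC =====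
def Spec_report_is_safe (report : List Int) (out : Bool × List Int) : Prop := out = report_is_safe_alt report
instance (report : List Int) (out : Bool × List Int) : Decidable (Spec_report_is_safe report out) := by unfold Spec_report_is_safe; infer_instance

-- ===== CLAIM (what is proved, stated in full; the proofs are below) =====
def Claim_equal_report_is_safe : Prop := ∀ (report : List Int), Dom_report_is_safe report → Spec_report_is_safe report (report_is_safe report)

-- ===== LEMMAS AND PROOFS =====

-- A's loop body, rephrased on an (index, pair) element
def stepA (st : Bool × List Int × Option Int) (p : Int × Int × Int) : Bool × List Int × Option Int :=
  let diff := |p.2.1 - p.2.2|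
  let rep_dir := comp_direction p.2.1 p.2.2
  let main := if rep_dir ≠ 0 ∧ st.2.2 = none then some rep_dir else st.2.2
  if diff < 1 ∨ diff > 3 ∨ some rep_dir ≠ main
  then (false, st.2.1 ++ [p.1], main)
  else (st.1, st.2.1, main)

-- B's failure scan with the direction fixed to m
def failsB (ps : List (Int × Int)) (s m : Int) : List Int :=
  ((PySem.List.enumerate ps s).filter
    (fun p => !(decide (1 ≤ (p.2.2 - p.2.1) * m ∧ (p.2.2 - p.2.1) * m ≤ 3)))).map (·.1)

-- A's per-pair test with direction m equals B's multiplicative range test, for m = ±1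
lemma cond_eq (a b m : Int) (hm : m = 1 ∨ m = -1) :
    (|a - b| < 1 ∨ |a - b| > 3 ∨ some (comp_direction a b) ≠ some m)
    ↔ ¬(1 ≤ (b - a) * m ∧ (b - a) * m ≤ 3) := by
  rcases hm with rfl | rfl <;> unfold comp_direction <;>
    rcases abs_cases (a - b) with ⟨h1, h2⟩ | ⟨h1, h2⟩ <;>
    split_ifs <;> simp <;> omega

lemma lemFix (ps : List (Int × Int)) (m : Int) (hm : m = 1 ∨ m = -1) :
    ∀ (s : Int) (b : Bool) (acc : List Int),
    (PySem.List.enumerate ps s).foldl stepA (b, acc, some m)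
      = (b && (failsB ps s m).isEmpty, acc ++ failsB ps s m, some m) := by
  induction ps with
  | nil => intro s b acc; simp [failsB, PySem.List.enumerate_nil]
  | cons p rest ih =>
    intro s b acc
    have hc := cond_eq p.1 p.2 m hm
    rw [PySem.List.enumerate_cons]
    simp only [List.foldl_cons]
    by_cases h : 1 ≤ (p.2 - p.1) * m ∧ (p.2 - p.1) * m ≤ 3
    · have hcond := hc.not.mpr (not_not_intro h)
      push_neg at hcond
      obtain ⟨h1, h2, h3⟩ := hcond
      have hne12 : ¬ p.1 = p.2 := by intro he; rw [he] at h; simp at h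
      have hstep : stepA (b, acc, some m) (s, p) = (b, acc, some m) := by
        simp only [stepA]
        simp [not_lt.mpr h2, Option.some.inj h3, sub_eq_zero, hne12]
      have hpred : (!decide (1 ≤ (p.2 - p.1) * m) || !decide ((p.2 - p.1) * m ≤ 3)) = false := by
        simp [h.1, h.2]
      rw [hstep, ih]
      simp [failsB, PySem.List.enumerate_cons, hpred]
    · have hA := hc.mpr h
      have hcond : p.1 - p.2 = 0 ∨ 3 < |p.1 - p.2| ∨ ¬comp_direction p.1 p.2 = m := by
        rcases hA with h1 | h1 | h1
        · left; rcases abs_cases (p.1 - p.2) with ⟨e, _⟩ | ⟨e, _⟩ <;> omega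
        · right; left; exact h1
        · right; right; simpa using h1
      have hstep : stepA (b, acc, some m) (s, p) = (false, acc ++ [s], some m) := by
        simp only [stepA]
        simp [sub_eq_zero] at hcond ⊢
        intro h1 h2
        rcases hcond with hc1 | hc1 | hc1
        · exact absurd hc1 h1
        · exact absurd hc1 (not_lt.mpr h2)
        · exact hc1
      have hpred : (!decide (1 ≤ (p.2 - p.1) * m) || !decide ((p.2 - p.1) * m ≤ 3)) = true := by
        rcases not_and_or.mp h with h' | h' <;> simp [h']
      rw [hstep, ih]
      simp [failsB, PySem.List.enumerate_cons, hpred]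

-- the pivot pair found by B (the first unequal adjacent pair)
def pivot (ps : List (Int × Int)) : Option (Int × Int) := ps.find? (fun p => p.1 != p.2)

def dirOf (q : Int × Int) : Int := if q.2 > q.1 then 1 else -1

-- A's fold from the direction-less start, expressed through B's pivot
lemma lemNone (ps : List (Int × Int)) :
    ∀ (s : Int) (b : Bool) (acc : List Int),
    (PySem.List.enumerate ps s).foldl stepA (b, acc, none)
      = (match pivot ps with
         | none => (b && ps.isEmpty, acc ++ ((PySem.List.enumerate ps s).map (·.1)), none)
         | some q => (b && (failsB ps s (dirOf q)).isEmpty, acc ++ failsB ps s (dirOf q), some (dirOf q))) := by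
  induction ps with
  | nil => intro s b acc; simp [pivot, PySem.List.enumerate_nil]
  | cons p rest ih =>
    intro s b acc
    by_cases hp : p.1 = p.2
    · have hdir : comp_direction p.1 p.2 = 0 := by unfold comp_direction; split_ifs <;> omega
      have hpe : pivot (p :: rest) = pivot rest := by simp [pivot, hp]
      have hfail : |p.1 - p.2| < 1 := by rw [hp]; simp
      rw [PySem.List.enumerate_cons]
      simp only [List.foldl_cons]
      have hstep : stepA (b, acc, none) (s, p) = (false, acc ++ [s], none) := by
        simp [stepA, hdir, hfail]
      rw [hstep, ih]
      rcases hq : pivot rest with _ | q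
      · simp [hpe, hq, PySem.List.enumerate_cons]
      · have hz : p.2 - p.1 = 0 := by omega
        simp [hpe, hq, failsB, PySem.List.enumerate_cons, hz]
    · have hdir : comp_direction p.1 p.2 = dirOf p := by
        unfold comp_direction dirOf; split_ifs <;> omega
      have hm : dirOf p = 1 ∨ dirOf p = -1 := by unfold dirOf; split_ifs <;> simp
      have hne : dirOf p ≠ 0 := by rcases hm with h' | h' <;> rw [h'] <;> decide
      have hpe : pivot (p :: rest) = some p := by simp [pivot, hp]
      have hsub : p.1 - p.2 ≠ 0 := sub_ne_zero_of_ne hp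
      rw [PySem.List.enumerate_cons]
      simp only [List.foldl_cons]
      have hc := cond_eq p.1 p.2 (dirOf p) hm
      by_cases h : 1 ≤ (p.2 - p.1) * dirOf p ∧ (p.2 - p.1) * dirOf p ≤ 3
      · have hcond := hc.not.mpr (not_not_intro h)
        push_neg at hcond
        obtain ⟨h1, h2, h3⟩ := hcond
        have hstep : stepA (b, acc, none) (s, p) = (b, acc, some (dirOf p)) := by
          simp [stepA, hdir, hne, hsub, not_lt.mpr h2]
        rw [hstep, lemFix rest (dirOf p) hm]
        have hpred : (!decide (1 ≤ (p.2 - p.1) * dirOf p) || !decide ((p.2 - p.1) * dirOf p ≤ 3)) = false := by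
          simp [h.1, h.2]
        simp [hpe, failsB, PySem.List.enumerate_cons, hpred]
      · have hA := hc.mpr h
        have hgt : 3 < |p.1 - p.2| := by
          rcases hA with h1 | h1 | h1
          · rcases abs_cases (p.1 - p.2) with ⟨e, _⟩ | ⟨e, _⟩ <;> omega
          · exact h1
          · exfalso; rw [hdir] at h1; exact h1 rfl
        have hstep : stepA (b, acc, none) (s, p) = (false, acc ++ [s], some (dirOf p)) := by
          simp [stepA, hdir, hne, hgt]
        rw [hstep, lemFix rest (dirOf p) hm]
        have hpred : (!decide (1 ≤ (p.2 - p.1) * dirOf p) || !decide ((p.2 - p.1) * dirOf p ≤ 3)) = true := by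
          rcases not_and_or.mp h with h' | h' <;> simp [h']
        simp [hpe, failsB, PySem.List.enumerate_cons, hpred]

lemma enum_eq {α : Type} (xs : List α) (d0 : α) : ∀ s : Int,
    PySem.List.enumerate xs s = (List.range xs.length).map (fun (k : Nat) => (s + (k : Int), xs.getD k d0)) := by
  induction xs with
  | nil => intro s; simp [PySem.List.enumerate_nil]
  | cons x rest ih =>
    intro s
    simp [PySem.List.enumerate_cons, ih, List.range_succ_eq_map, List.map_map, Function.comp]
    intro a _; ring

-- the pyRange/pyGetD index loop of A equals the stepA fold over the enumerated pair table
lemma foldA_eq (report : List Int) :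
    (PySem.List.pyRange 0 ((report.length : Int) - 1) 1).foldl
      (fun (st : Bool × List Int × Option Int) (idx : Int) =>
        let diff := |PySem.List.pyGetD report idx 0 - PySem.List.pyGetD report (idx + 1) 0|
        let rep_dir := comp_direction (PySem.List.pyGetD report idx 0) (PySem.List.pyGetD report (idx + 1) 0)
        let main := if rep_dir ≠ 0 ∧ st.2.2 = none then some rep_dir else st.2.2
        if diff < 1 ∨ diff > 3 ∨ some rep_dir ≠ main
        then (false, st.2.1 ++ [idx], main)
        else (st.1, st.2.1, main))
      (true, [], none)
    = (PySem.List.enumerate (report.zip (report.drop 1)) 0).foldl stepA (true, [], none) := by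
  have hlen : (report.zip (report.drop 1)).length = ((report.length : Int) - 1 - 0).toNat := by
    simp [List.length_zip]
  rw [PySem.List.pyRange_one, enum_eq (report.zip (report.drop 1)) (0, 0), hlen, List.foldl_map, List.foldl_map]
  apply PySem.List.foldl_congr_mem
  intro acc k hk
  have hk' : k + 1 < report.length := by
    have := List.mem_range.mp hk
    omega
  have hx : PySem.List.pyGetD report ((0 : Int) + (k : Int)) 0 = report[k] := by
    rw [zero_add, PySem.List.pyGetD_natCast]
    exact List.getD_eq_getElem report 0 (by omega)
  have hy : PySem.List.pyGetD report ((0 : Int) + (k : Int) + 1) 0 = report[k + 1] := by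
    have hc : (0 : Int) + (k : Int) + 1 = ((k + 1 : Nat) : Int) := by push_cast; ring
    rw [hc, PySem.List.pyGetD_natCast]
    exact List.getD_eq_getElem report 0 hk'
  have hd : (report.zip (report.drop 1)).getD k (0, 0) = (report[k], report[k + 1]) := by
    have hklt : k < (report.zip (report.drop 1)).length := by
      simp [List.length_zip]; omega
    rw [List.getD_eq_getElem _ _ hklt]
    simp [List.getElem_zip]
  simp only [hx, hy, hd, stepA]

-- B's find? over the enumerated pairs, projected to the pair, is the pivot
lemma find_enum (ps : List (Int × Int)) : ∀ s : Int,
    ((PySem.List.enumerate ps s).find? (fun p => p.2.1 != p.2.2)).map (·.2) = pivot ps := by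
  induction ps with
  | nil => intro s; simp [pivot, PySem.List.enumerate_nil]
  | cons p rest ih =>
    intro s
    by_cases hp : p.1 = p.2
    · simp [pivot, PySem.List.enumerate_cons, hp]
      have := ih (s + 1)
      simpa [pivot] using this
    · simp [pivot, PySem.List.enumerate_cons, hp]

-- ===== VERDICT (by name: the statement is the Claim_ definition above) =====
theorem report_is_safe_spec : Claim_equal_report_is_safe := by
  intro report _
  unfold Spec_report_is_safe report_is_safe report_is_safe_alt
  rw [foldA_eq, lemNone]
  have hfe := find_enum (report.zip (report.drop 1)) 0
  rcases hfind : (PySem.List.enumerate (report.zip (report.drop 1)) 0).find? (fun p => p.2.1 != p.2.2) with _ | w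
  · have hq : pivot (report.zip (report.drop 1)) = none := by rw [← hfe, hfind]; rfl
    simp only [List.drop_one] at hfind hq
    simp only [List.drop_one, hfind, hq]
    have hlen : (report.zip report.tail).length = report.length - 1 := by
      rw [List.length_zip, List.length_tail]; omega
    have hie : (PySem.List.pyRange 0 ((report.length - 1 : Nat) : Int) 1).isEmpty
        = (report.zip report.tail).isEmpty := by
      rw [Bool.eq_iff_iff]
      simp only [List.isEmpty_iff, PySem.List.pyRange_one]
      rw [List.map_eq_nil_iff, List.range_eq_nil, ← List.length_eq_zero_iff, hlen]
      omega
    rw [PySem.List.map_fst_enumerate, zero_add]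
    simp [hie, hlen]
  · have hq : pivot (report.zip (report.drop 1)) = some w.2 := by rw [← hfe, hfind]; rfl
    simp only [List.drop_one] at hfind hq
    simp only [List.drop_one, hfind, hq]
    simp [failsB, dirOf, gt_iff_lt]
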